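-- pv_equiv track=rewrite | github.com/cesarmanuel8102/AI_Vault | 00_identity/brain_chat_ui_server.py | _render_truth_first_sections
-- ===== SOURCE A (Python) =====
-- def _render_truth_first_sections(evidence: list[str], inference: list[str], execution: list[str], memory_points: list[str], utility: str) -> str:
--     lines: list[str] = []
--     lines.append("Evidencia canónica:")
--     lines.extend(f"- {item}" for item in evidence)
--     if memory_points:
--         lines.append("")
--         lines.append("Memoria útil reciente:")
--         lines.extend(f"- {item}" for item in memory_points)
--     lines.append("")
--     lines.append("Inferencia operativa:")
--     lines.extend(f"- {item}" for item in inference)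
--     lines.append("")
--     lines.append("Ejecución posible ahora:")
--     lines.extend(f"- {item}" for item in execution)
--     lines.append("")
--     lines.append(f"Utilidad objetivo: {utility}")
--     return "\n".join(lines)
-- ===== SOURCE B (Python) =====
-- def _render_block(title: str, items: list[str]) -> str:
--     return "\n".join([title, *(f"- {item}" for item in items)])
--
--
-- def _render_truth_first_sections(evidence: list[str], inference: list[str], execution: list[str], memory_points: list[str], utility: str) -> str:
--     blocks: list[tuple[str, list[str]]] = [("Evidencia canónica:", evidence)]
--     if memory_points:
--         blocks.append(("Memoria útil reciente:", memory_points))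
--     blocks.append(("Inferencia operativa:", inference))
--     blocks.append(("Ejecución posible ahora:", execution))
--     rendered = [_render_block(title, items) for title, items in blocks]
--     rendered.append(f"Utilidad objetivo: {utility}")
--     return "\n\n".join(rendered)
-- ===== Notes on version B (the rewrite author's own statement) =====
-- stated objective: alternative
-- what changed: Replaces the flat per-line append sequence with a two-phase build: first a structured list of (title, items) section blocks, then each block rendered to one string by a helper and the blocks joined with '\n\n' so separators come from the join rather than explicit empty lines.
import Mathlib
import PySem

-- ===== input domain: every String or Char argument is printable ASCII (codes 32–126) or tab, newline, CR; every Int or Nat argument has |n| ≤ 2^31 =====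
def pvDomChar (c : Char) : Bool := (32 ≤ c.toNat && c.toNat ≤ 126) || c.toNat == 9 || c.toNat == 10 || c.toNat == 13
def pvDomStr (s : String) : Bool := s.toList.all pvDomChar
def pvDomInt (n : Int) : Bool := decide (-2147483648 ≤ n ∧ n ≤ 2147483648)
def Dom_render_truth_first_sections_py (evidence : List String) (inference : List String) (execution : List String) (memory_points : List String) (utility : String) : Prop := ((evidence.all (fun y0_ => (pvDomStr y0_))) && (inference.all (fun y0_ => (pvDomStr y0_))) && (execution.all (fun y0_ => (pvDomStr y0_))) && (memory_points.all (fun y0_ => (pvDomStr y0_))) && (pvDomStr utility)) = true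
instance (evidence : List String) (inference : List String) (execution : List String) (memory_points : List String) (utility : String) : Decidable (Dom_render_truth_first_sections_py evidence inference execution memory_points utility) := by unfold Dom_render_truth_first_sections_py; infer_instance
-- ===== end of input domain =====

-- B builds a structured list of (title, items) blocks, renders each block to one string,
-- and joins the blocks with "\n\n" (a different decomposition; same cost).

-- ===== PORT A =====
-- literal transliteration of A: one flat list of lines, blank lines appended explicitly, joined by "\n"
def render_truth_first_sections_py (evidence : List String) (inference : List String) (execution : List String) (memory_points : List String) (utility : String) : String :=
  let lines : List String := []
  let lines := lines ++ ["Evidencia canónica:"]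
  let lines := lines ++ evidence.map (fun item => "- " ++ item)
  let lines := if memory_points.isEmpty then lines
    else lines ++ ["", "Memoria útil reciente:"] ++ memory_points.map (fun item => "- " ++ item)
  let lines := lines ++ ["", "Inferencia operativa:"] ++ inference.map (fun item => "- " ++ item)
  let lines := lines ++ ["", "Ejecución posible ahora:"] ++ execution.map (fun item => "- " ++ item)
  let lines := lines ++ ["", "Utilidad objetivo: " ++ utility]
  PySem.Str.join "\n" lines

-- ===== PORT B =====
def pvRenderBlock (title : String) (items : List String) : String :=
  PySem.Str.join "\n" (title :: items.map (fun item => "- " ++ item))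

def render_truth_first_sections_py_alt (evidence : List String) (inference : List String) (execution : List String) (memory_points : List String) (utility : String) : String :=
  let blocks : List (String × List String) := [("Evidencia canónica:", evidence)]
  let blocks := if memory_points.isEmpty then blocks
    else blocks ++ [("Memoria útil reciente:", memory_points)]
  let blocks := blocks ++ [("Inferencia operativa:", inference), ("Ejecución posible ahora:", execution)]
  let rendered := blocks.map (fun b => pvRenderBlock b.1 b.2)
  let rendered := rendered ++ ["Utilidad objetivo: " ++ utility]
  PySem.Str.join "\n\n" rendered

-- ===== PRECONDITION & SPEC =====
def Spec_render_truth_first_sections_py (evidence : List String) (inference : List String) (execution : List String) (memory_points : List String) (utility : String) (out : String) : Prop := out = render_truth_first_sections_py_alt evidence inference execution memory_points utility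
instance (evidence : List String) (inference : List String) (execution : List String) (memory_points : List String) (utility : String) (out : String) : Decidable (Spec_render_truth_first_sections_py evidence inference execution memory_points utility out) := by unfold Spec_render_truth_first_sections_py; infer_instance

-- ===== CLAIM (what is proved, stated in full; the proofs are below) =====
def Claim_equal_render_truth_first_sections_py : Prop := ∀ (evidence : List String) (inference : List String) (execution : List String) (memory_points : List String) (utility : String), Dom_render_truth_first_sections_py evidence inference execution memory_points utility → Spec_render_truth_first_sections_py evidence inference execution memory_points utility (render_truth_first_sections_py evidence inference execution memory_points utility)

-- ===== LEMMAS AND PROOFS =====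

-- joining a list split by one empty line equals the two halves joined by the doubled separator
theorem chars_join_split (sep : List Char) (a b : List (List Char)) (ha : a ≠ []) (hb : b ≠ []) :
    PySem.Chars.join sep (a ++ [] :: b) = PySem.Chars.join sep a ++ sep ++ sep ++ PySem.Chars.join sep b := by
  induction a with
  | nil => exact absurd rfl ha
  | cons x a' ih =>
    cases a' with
    | nil =>
      cases b with
      | nil => exact absurd rfl hb
      | cons y b' =>
        simp [PySem.Chars.join_cons_cons, PySem.Chars.join_singleton, List.append_assoc]
    | cons z a'' =>
      have h := ih (by simp)
      simp only [List.cons_append, PySem.Chars.join_cons_cons] at h ⊢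
      rw [h]
      simp only [List.append_assoc]

theorem str_join_split (a b : List String) (ha : a ≠ []) (hb : b ≠ []) :
    PySem.Str.join "\n" (a ++ "" :: b)
      = PySem.Str.join "\n" a ++ "\n\n" ++ PySem.Str.join "\n" b := by
  apply String.toList_inj.mp
  have h := chars_join_split "\n".toList (a.map String.toList) (b.map String.toList)
    (by simpa using ha) (by simpa using hb)
  simp only [PySem.Str.toList_join, String.toList_append, List.map_append, List.map_cons,
    String.toList_empty] at *
  rw [h]
  simp [List.append_assoc]

theorem str_join2_cons (r : String) (rs : List String) (h : rs ≠ []) :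
    PySem.Str.join "\n\n" (r :: rs) = r ++ "\n\n" ++ PySem.Str.join "\n\n" rs := by
  cases rs with
  | nil => exact absurd rfl h
  | cons y rs' =>
    apply String.toList_inj.mp
    simp [PySem.Str.toList_join, PySem.Chars.join_cons_cons, List.append_assoc]

theorem str_join_singleton (sep p : String) : PySem.Str.join sep [p] = p := by
  apply String.toList_inj.mp
  simp [PySem.Str.toList_join, PySem.Chars.join_singleton]

-- ===== VERDICT (by name: the statement is the Claim_ definition above) =====
theorem render_truth_first_sections_py_spec : Claim_equal_render_truth_first_sections_py := by
  intro evidence inference execution memory_points utility _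
  unfold Spec_render_truth_first_sections_py
  unfold render_truth_first_sections_py render_truth_first_sections_py_alt pvRenderBlock
  by_cases hm : memory_points.isEmpty
  · simp only [hm, if_pos trivial]
    have h1 : ([] : List String) ++ ["Evidencia canónica:"] ++ evidence.map (fun item => "- " ++ item)
        ++ ["", "Inferencia operativa:"] ++ inference.map (fun item => "- " ++ item)
        ++ ["", "Ejecución posible ahora:"] ++ execution.map (fun item => "- " ++ item)
        ++ ["", "Utilidad objetivo: " ++ utility]
        = ("Evidencia canónica:" :: evidence.map (fun item => "- " ++ item)) ++ "" ::
            (("Inferencia operativa:" :: inference.map (fun item => "- " ++ item)) ++ "" ::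
              (("Ejecución posible ahora:" :: execution.map (fun item => "- " ++ item)) ++ "" ::
                ["Utilidad objetivo: " ++ utility])) := by simp
    rw [h1, str_join_split _ _ (by simp) (by simp), str_join_split _ _ (by simp) (by simp),
        str_join_split _ _ (by simp) (by simp), str_join_singleton]
    simp only [List.map_cons, List.map_nil, List.cons_append, List.nil_append]
    rw [str_join2_cons _ _ (by simp), str_join2_cons _ _ (by simp), str_join2_cons _ _ (by simp),
        str_join_singleton]
  · simp only [if_neg hm]
    have h1 : ([] : List String) ++ ["Evidencia canónica:"] ++ evidence.map (fun item => "- " ++ item)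
        ++ ["", "Memoria útil reciente:"] ++ memory_points.map (fun item => "- " ++ item)
        ++ ["", "Inferencia operativa:"] ++ inference.map (fun item => "- " ++ item)
        ++ ["", "Ejecución posible ahora:"] ++ execution.map (fun item => "- " ++ item)
        ++ ["", "Utilidad objetivo: " ++ utility]
        = ("Evidencia canónica:" :: evidence.map (fun item => "- " ++ item)) ++ "" ::
            (("Memoria útil reciente:" :: memory_points.map (fun item => "- " ++ item)) ++ "" ::
              (("Inferencia operativa:" :: inference.map (fun item => "- " ++ item)) ++ "" ::
                (("Ejecución posible ahora:" :: execution.map (fun item => "- " ++ item)) ++ "" ::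
                  ["Utilidad objetivo: " ++ utility]))) := by simp
    rw [h1, str_join_split _ _ (by simp) (by simp), str_join_split _ _ (by simp) (by simp),
        str_join_split _ _ (by simp) (by simp), str_join_split _ _ (by simp) (by simp),
        str_join_singleton]
    simp only [List.map_cons, List.map_nil, List.cons_append, List.nil_append]
    rw [str_join2_cons _ _ (by simp), str_join2_cons _ _ (by simp), str_join2_cons _ _ (by simp),
        str_join2_cons _ _ (by simp), str_join_singleton]
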